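-- pv_equiv track=rewrite | github.com/Judilyn28/snle | src/graph.py | _normalize_cycle_signature
-- ===== SOURCE A (Python) =====
-- from typing import Dict, List, Optional, Set, Tuple
--
-- def _normalize_cycle_signature(cycle_nodes: List[str]) -> Tuple[str, ...]:
--     if not cycle_nodes:
--         return tuple()
--     core = cycle_nodes[:-1] if len(cycle_nodes) > 1 and cycle_nodes[0] == cycle_nodes[-1] else cycle_nodes[:]
--     if not core:
--         return tuple()
--     rotations = [tuple(core[i:] + core[:i]) for i in range(len(core))]
--     reversed_core = list(reversed(core))
--     rotations += [tuple(reversed_core[i:] + reversed_core[:i]) for i in range(len(reversed_core))]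
--     return min(rotations)
-- ===== SOURCE B (Python) =====
-- def _normalize_cycle_signature(cycle_nodes):
--     if not cycle_nodes:
--         return tuple()
--     core = cycle_nodes[:-1] if len(cycle_nodes) > 1 and cycle_nodes[0] == cycle_nodes[-1] else list(cycle_nodes)
--     n = len(core)
--     rev = core[::-1]
--     # Column-wise elimination tournament: candidates are the rotation start
--     # positions inside one buffer holding the doubled core and doubled reversed
--     # core; at each offset d only the candidates whose d-th symbol is minimal
--     # survive.  Any survivor of all n rounds spells the smallest rotation.
--     big = core + core + rev + rev
--     cands = list(range(n)) + list(range(2 * n, 3 * n))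
--     for d in range(n):
--         ks = [big[i + d] for i in cands]
--         c = min(ks)
--         cands = [i for i, k in zip(cands, ks) if k == c]
--     i = cands[0]
--     return tuple(big[i:i + n])
-- ===== Notes on version B (the rewrite author's own statement) =====
-- stated objective: alternative
-- what changed: A materializes all 2n full rotations and takes their min; B never builds a rotation during the search: it runs a column-wise elimination tournament over integer rotation-start positions in one doubled forward/reversed buffer, each offset round keeping only the candidates whose symbol there is minimal, and slices the single answer out at the end.
import Mathlib
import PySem

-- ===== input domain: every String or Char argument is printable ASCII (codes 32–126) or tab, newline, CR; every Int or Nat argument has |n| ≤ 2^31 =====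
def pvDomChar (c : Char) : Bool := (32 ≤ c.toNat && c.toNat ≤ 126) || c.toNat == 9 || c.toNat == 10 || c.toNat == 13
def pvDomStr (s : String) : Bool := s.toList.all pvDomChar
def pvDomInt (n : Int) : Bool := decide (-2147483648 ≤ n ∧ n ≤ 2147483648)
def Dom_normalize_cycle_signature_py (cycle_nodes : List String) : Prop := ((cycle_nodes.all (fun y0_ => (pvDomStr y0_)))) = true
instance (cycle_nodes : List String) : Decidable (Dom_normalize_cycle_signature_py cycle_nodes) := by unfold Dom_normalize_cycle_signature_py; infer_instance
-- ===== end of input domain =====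

-- B replaces A's "materialize all 2n rotations, then min" by a column-wise elimination
-- tournament: the rotation start positions inside one doubled forward/reversed buffer are
-- candidates, and each offset round keeps only the candidates whose symbol at that offset
-- is minimal (objective: alternative).

-- ===== PORT A =====
def normalize_cycle_signature_py (cycle_nodes : List String) : List String :=
  if cycle_nodes = [] then []
  else
    let core :=
      if 1 < cycle_nodes.length ∧
          PySem.List.pyGet? cycle_nodes 0 = PySem.List.pyGet? cycle_nodes (-1)
      then PySem.List.slice cycle_nodes none (some (-1))
      else PySem.List.slice cycle_nodes none none
    if core = [] then []
    else
      let rotations := (PySem.List.pyRange 0 (core.length : Int) 1).map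
        (fun i => PySem.List.slice core (some i) none ++ PySem.List.slice core none (some i))
      let reversed_core := core.reverse
      let rotations := rotations ++ (PySem.List.pyRange 0 (reversed_core.length : Int) 1).map
        (fun i => PySem.List.slice reversed_core (some i) none ++ PySem.List.slice reversed_core none (some i))
      -- min(rotations): rotations is nonempty here, so min? is some
      (PySem.List.min? rotations (fun x => x)).getD []

-- ===== PORT B =====
-- one round: 'ks = [big[i+d] for i in cands]; c = min(ks); cands = [i for i,k in zip(cands,ks) if k == c]'
-- ('big[i + d]' is always in range here, so getD is exact)
def pvRound (big : List String) (d : Nat) (C : List Nat) : List Nat :=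
  let ks := C.map (fun i => big.getD (i + d) "")
  let c := (PySem.List.min? ks (fun x => x)).getD ""
  ((C.zip ks).filter (fun p => p.2 == c)).map (fun p => p.1)

def normalize_cycle_signature_py_alt (cycle_nodes : List String) : List String :=
  if cycle_nodes = [] then []
  else
    let core :=
      if 1 < cycle_nodes.length ∧
          PySem.List.pyGet? cycle_nodes 0 = PySem.List.pyGet? cycle_nodes (-1)
      then PySem.List.slice cycle_nodes none (some (-1))
      else cycle_nodes
    let n := core.length
    let rev := core.reverse
    let big := core ++ core ++ rev ++ rev
    let cands := List.range n ++ List.range' (2 * n) n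
    let final := (List.range n).foldl (fun C d => pvRound big d C) cands
    match final with
    | [] => []   -- unreachable: the candidate list stays nonempty (core ≠ [])
    | i :: _ => PySem.List.slice big (some (i : Int)) (some ((i : Int) + (n : Int)))

-- ===== PRECONDITION & SPEC =====
def Spec_normalize_cycle_signature_py (cycle_nodes : List String) (out : List String) : Prop := out = normalize_cycle_signature_py_alt cycle_nodes
instance (cycle_nodes : List String) (out : List String) : Decidable (Spec_normalize_cycle_signature_py cycle_nodes out) := by unfold Spec_normalize_cycle_signature_py; infer_instance

-- ===== CLAIM (what is proved, stated in full; the proofs are below) =====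
def Claim_equal_normalize_cycle_signature_py : Prop := ∀ (cycle_nodes : List String), Dom_normalize_cycle_signature_py cycle_nodes → Spec_normalize_cycle_signature_py cycle_nodes (normalize_cycle_signature_py cycle_nodes)

-- ===== LEMMAS AND PROOFS =====

-- rotation i of seq
def pvRot (seq : List String) (i : Nat) : List String := seq.drop i ++ seq.take i

-- length-d prefix of the rotation that start position i of the buffer stands for
def pvPref (big : List String) (d i : Nat) : List String := (big.drop i).take d

-- invariant of the elimination loop after d rounds: candidate pool R, survivors C
def pvInv (big : List String) (R C : List Nat) (d : Nat) : Prop :=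
  C ≠ [] ∧ (∀ i ∈ C, i ∈ R) ∧
  (∀ i ∈ C, ∀ j ∈ R, pvPref big d i ≤ pvPref big d j) ∧
  (∀ j ∈ R, (∀ k ∈ R, pvPref big d j ≤ pvPref big d k) → j ∈ C)

-- A's rotation comprehension is the map of pvRot over range
theorem pvRotationsA_eq (seq : List String) :
    (PySem.List.pyRange 0 (seq.length : Int) 1).map
        (fun i => PySem.List.slice seq (some i) none ++ PySem.List.slice seq none (some i))
      = (List.range seq.length).map (pvRot seq) := by
  rw [PySem.List.pyRange_one]
  simp [List.map_map, Function.comp, pvRot, PySem.List.slice_from_natCast, PySem.List.slice_to_natCast]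

-- a window of the doubled sequence is a rotation
theorem pvDoubled_slice (seq : List String) (k : Nat) (hk : k ≤ seq.length) :
    ((seq ++ seq).drop k).take seq.length = pvRot seq k := by
  rw [List.drop_append_of_le_length hk, List.take_append]
  have h1 : (seq.drop k).length = seq.length - k := by simp
  rw [List.take_of_length_le (by omega), h1, pvRot]
  congr 1
  congr 1
  omega

-- lexicographic facts about List String ('<' on List is Mathlib's Lex order)
theorem pvLt_iff (a b : List String) : a < b ↔ List.Lex (· < ·) a b := Iff.rfl

theorem pvLexApp : ∀ {a b : List String}, a.length = b.length → List.Lex (· < ·) a b →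
    ∀ (u v : List String), List.Lex (· < ·) (a ++ u) (b ++ v)
  | _, _, hl, List.Lex.nil, _, _ => absurd hl (by simp)
  | _, _, hl, List.Lex.cons h, u, v => List.Lex.cons (pvLexApp (by simpa using hl) h u v)
  | _, _, _, List.Lex.rel h, _, _ => List.Lex.rel h

theorem pvLexCancel : ∀ (p : List String) {u v : List String},
    List.Lex (· < ·) (p ++ u) (p ++ v) → List.Lex (· < ·) u v
  | [], _, _, h => h
  | x :: t, u, v, h => by
    cases h with
    | cons h' => exact pvLexCancel t h'
    | rel h' => exact absurd h' (lt_irrefl x)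

theorem pvLex_append (a b u v : List String) (hl : a.length = b.length) (h : a < b) :
    a ++ u < b ++ v :=
  (pvLt_iff _ _).mpr (pvLexApp hl ((pvLt_iff _ _).mp h) u v)

theorem pvLex_append_left_le (p u v : List String) (h : u ≤ v) : p ++ u ≤ p ++ v := by
  rcases lt_or_eq_of_le h with hlt | heq
  · exact le_of_lt ((pvLt_iff _ _).mpr (List.Lex.append_left _ ((pvLt_iff _ _).mp hlt) p))
  · rw [heq]

theorem pvLex_append_left_le' (p u v : List String) (h : p ++ u ≤ p ++ v) : u ≤ v := by
  rcases lt_or_eq_of_le h with hlt | heq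
  · exact le_of_lt ((pvLt_iff _ _).mpr (pvLexCancel p ((pvLt_iff _ _).mp hlt)))
  · exact le_of_eq (List.append_cancel_left heq)

theorem pvSingleton_le (x y : String) : ([x] ≤ [y]) ↔ x ≤ y := by
  constructor
  · intro h
    rcases lt_or_eq_of_le h with hlt | heq
    · cases (pvLt_iff _ _).mp hlt with
      | cons h' => cases h'
      | rel h' => exact le_of_lt h'
    · exact le_of_eq (by injection heq)
  · intro h
    rcases lt_or_eq_of_le h with hlt | heq
    · exact le_of_lt ((pvLt_iff _ _).mpr (List.Lex.rel hlt))
    · exact le_of_eq (by rw [heq])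

theorem pvPref_len (big : List String) (n d i : Nat) (hwf : i + n ≤ big.length) (hd : d ≤ n) :
    (pvPref big d i).length = d := by
  unfold pvPref
  rw [List.length_take, List.length_drop]
  omega

theorem pvPref_succ (big : List String) (n d i : Nat) (hwf : i + n ≤ big.length) (hd : d < n) :
    pvPref big (d + 1) i = pvPref big d i ++ [big.getD (i + d) ""] := by
  unfold pvPref
  rw [List.take_add_one]
  congr 1
  have hlt : i + d < big.length := by omega
  rw [List.getElem?_drop, List.getElem?_eq_getElem hlt]
  simp [List.getD, List.getElem?_eq_getElem hlt]

-- a zip-with-keys filter is the plain filter on the keys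
theorem pvZipFilter (f : Nat → String) (c : String) (C : List Nat) :
    ((C.zip (C.map f)).filter (fun p => p.2 == c)).map (fun p => p.1)
      = C.filter (fun i => f i == c) := by
  induction C with
  | nil => rfl
  | cons x t ih =>
    simp only [List.map_cons, List.zip_cons_cons, List.filter_cons]
    by_cases h : (f x == c) = true
    · simp [h, ih]
    · simp [h, ih]

-- min? does not depend on the Decidable instance
theorem pvMin?_irrel {α κ : Type} [LT κ] (d1 d2 : DecidableRel (α := κ) (· < ·))
    (xs : List α) (key : α → κ) :
    @PySem.List.min? α κ _ d1 xs key = @PySem.List.min? α κ _ d2 xs key := by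
  have h : d1 = d2 := funext fun a => funext fun b => Subsingleton.elim _ _
  rw [h]

-- min? agrees on a dominating nonempty sublist
theorem pvMin?_eq_of_dominating (R C : List (List String))
    (hC : C ≠ []) (hsub : ∀ c ∈ C, c ∈ R) (hdom : ∀ r ∈ R, ∃ c ∈ C, c ≤ r) :
    @PySem.List.min? _ _ _ LinearOrder.toDecidableLT R (fun x => x)
      = @PySem.List.min? _ _ _ LinearOrder.toDecidableLT C (fun x => x) := by
  obtain ⟨c0, hc0⟩ : ∃ c0, @PySem.List.min? _ _ _ LinearOrder.toDecidableLT C (fun x => x) = some c0 := by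
    cases h : @PySem.List.min? _ _ _ LinearOrder.toDecidableLT C (fun x => x) with
    | none => exact absurd ((@PySem.List.min?_eq_none_iff (List String) (List String) List.instLinearOrder.toLT LinearOrder.toDecidableLT C (fun x => x)).mp h) hC
    | some c0 => exact ⟨c0, rfl⟩
  have hc0R : c0 ∈ R := hsub c0 (@PySem.List.min?_mem (List String) (List String) List.instLinearOrder.toLT LinearOrder.toDecidableLT _ _ _ hc0)
  obtain ⟨r0, hr0⟩ : ∃ r0, @PySem.List.min? _ _ _ LinearOrder.toDecidableLT R (fun x => x) = some r0 := by
    cases h : @PySem.List.min? _ _ _ LinearOrder.toDecidableLT R (fun x => x) with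
    | none =>
      have : R = [] := (@PySem.List.min?_eq_none_iff (List String) (List String) List.instLinearOrder.toLT LinearOrder.toDecidableLT R (fun x => x)).mp h
      rw [this] at hc0R
      exact absurd hc0R (List.not_mem_nil)
    | some r0 => exact ⟨r0, rfl⟩
  rw [hr0, hc0]
  have h1 : r0 ≤ c0 := PySem.List.min?_isMin hr0 c0 hc0R
  obtain ⟨c, hcC, hcr⟩ := hdom r0 (@PySem.List.min?_mem (List String) (List String) List.instLinearOrder.toLT LinearOrder.toDecidableLT _ _ _ hr0)
  have h2 : c0 ≤ r0 := le_trans (PySem.List.min?_isMin hc0 c hcC) hcr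
  exact congrArg some (le_antisymm h1 h2)

-- one elimination round preserves the invariant
theorem pvRound_inv (big : List String) (n : Nat) (R C : List Nat)
    (hWF : ∀ i ∈ R, i + n ≤ big.length) (d : Nat) (hd : d < n)
    (h : pvInv big R C d) : pvInv big R (pvRound big d C) (d + 1) := by
  obtain ⟨hne, hsub, hmin, hcomp⟩ := h
  obtain ⟨k0, hk0⟩ : ∃ k0, PySem.List.min? (C.map (fun i => big.getD (i + d) "")) (fun x => x) = some k0 := by
    cases hm : PySem.List.min? (C.map (fun i => big.getD (i + d) "")) (fun x => x) with
    | none =>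
      have := (PySem.List.min?_eq_none_iff (C.map (fun i => big.getD (i + d) "")) (fun x => x)).mp hm
      exact absurd (List.map_eq_nil_iff.mp this) hne
    | some k0 => exact ⟨k0, rfl⟩
  have hCfilter : pvRound big d C = C.filter (fun i => big.getD (i + d) "" == k0) := by
    unfold pvRound
    simp only [hk0, Option.getD_some]
    exact pvZipFilter (fun i => big.getD (i + d) "") k0 C
  obtain ⟨p0, hp0C, hp0k⟩ : ∃ p0 ∈ C, big.getD (p0 + d) "" = k0 :=
    List.mem_map.mp (PySem.List.min?_mem hk0)
  have hkmin : ∀ i ∈ C, k0 ≤ big.getD (i + d) "" := fun i hi =>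
    PySem.List.min?_isMin hk0 (big.getD (i + d) "") (List.mem_map_of_mem hi)
  have hmemfil : ∀ i, i ∈ pvRound big d C ↔ i ∈ C ∧ big.getD (i + d) "" = k0 := by
    intro i; rw [hCfilter]; simp [List.mem_filter]
  refine ⟨?_, ?_, ?_, ?_⟩
  · exact List.ne_nil_of_mem ((hmemfil p0).mpr ⟨hp0C, hp0k⟩)
  · intro i hi; exact hsub i ((hmemfil i).mp hi).1
  · intro i hi j hj
    obtain ⟨hiC, hik⟩ := (hmemfil i).mp hi
    have hwi := hWF i (hsub i hiC)
    have hwj := hWF j hj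
    rcases lt_or_eq_of_le (hmin i hiC j hj) with hlt | heq
    · rw [pvPref_succ big n d i hwi hd, pvPref_succ big n d j hwj hd]
      exact le_of_lt (pvLex_append _ _ _ _
        (by rw [pvPref_len big n d i hwi (le_of_lt hd), pvPref_len big n d j hwj (le_of_lt hd)]) hlt)
    · have hjmin : ∀ k ∈ R, pvPref big d j ≤ pvPref big d k := by
        intro k hk; rw [← heq]; exact hmin i hiC k hk
      have hjC : j ∈ C := hcomp j hj hjmin
      have hkj : k0 ≤ big.getD (j + d) "" := hkmin j hjC
      rw [pvPref_succ big n d i hwi hd, pvPref_succ big n d j hwj hd, heq]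
      exact pvLex_append_left_le _ _ _ ((pvSingleton_le _ _).mpr (hik ▸ hkj))
  · intro j hj hj1
    have hwj := hWF j hj
    have hj0 : ∀ k ∈ R, pvPref big d j ≤ pvPref big d k := by
      intro k hk
      by_contra hnle
      have hlt : pvPref big d k < pvPref big d j := not_le.mp hnle
      have hwk := hWF k hk
      have : pvPref big (d+1) k < pvPref big (d+1) j := by
        rw [pvPref_succ big n d k hwk hd, pvPref_succ big n d j hwj hd]
        exact pvLex_append _ _ _ _
          (by rw [pvPref_len big n d k hwk (le_of_lt hd), pvPref_len big n d j hwj (le_of_lt hd)]) hlt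
      exact absurd (hj1 k hk) (not_le.mpr this)
    have hjC : j ∈ C := hcomp j hj hj0
    have hp0R : p0 ∈ R := hsub p0 hp0C
    have hpref0 : pvPref big d j = pvPref big d p0 :=
      le_antisymm (hmin j hjC p0 hp0R) (hmin p0 hp0C j (hsub j hjC))
    have hle : big.getD (j + d) "" ≤ k0 := by
      have h1 := hj1 p0 hp0R
      rw [pvPref_succ big n d j hwj hd, pvPref_succ big n d p0 (hWF p0 hp0R) hd, hpref0] at h1
      exact hp0k ▸ (pvSingleton_le _ _).mp (pvLex_append_left_le' _ _ _ h1)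
    exact (hmemfil j).mpr ⟨hjC, le_antisymm hle (hkmin j hjC)⟩

-- the whole elimination loop keeps the invariant
theorem pvFold_inv (big : List String) (n : Nat) (R : List Nat)
    (hWF : ∀ i ∈ R, i + n ≤ big.length) (hne : R ≠ []) :
    ∀ d, d ≤ n → pvInv big R ((List.range d).foldl (fun C e => pvRound big e C) R) d := by
  intro d
  induction d with
  | zero =>
    intro _
    refine ⟨hne, fun i hi => hi, ?_, fun j hj _ => hj⟩
    intro i _ j _
    simp [pvPref]
  | succ d ih =>
    intro hd
    rw [List.range_succ, List.foldl_append]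
    exact pvRound_inv big n R _ hWF d (by omega) (ih (by omega))

-- windows of the combined buffer are rotations
theorem pvPref_rot_left (s t : List String) (i : Nat) (hi : i ≤ s.length) :
    pvPref ((s ++ s) ++ t) s.length i = pvRot s i := by
  unfold pvPref
  rw [List.drop_append_of_le_length (by simp; omega),
      List.take_append_of_le_length (by simp; omega)]
  exact pvDoubled_slice s i hi

theorem pvPref_rot_right (s t : List String) (j : Nat) (hj : j ≤ t.length) :
    pvPref (s ++ (t ++ t)) t.length (s.length + j) = pvRot t j := by
  unfold pvPref
  rw [List.drop_append, List.drop_eq_nil_of_le (by omega), List.nil_append,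
      Nat.add_sub_cancel_left]
  exact pvDoubled_slice t j hj

theorem pvPref_rot_right' (s t : List String) (j n : Nat) (hn : n = t.length) (hj : j ≤ n) :
    pvPref (s ++ (t ++ t)) n (s.length + j) = pvRot t j := by
  subst hn
  exact pvPref_rot_right s t j hj

-- the common tail of both ports, once the core is fixed and nonempty
theorem pvTail_eq (core : List String) (hcne : core ≠ []) :
    (if core = [] then ([] : List String)
     else
       (PySem.List.min?
         ((PySem.List.pyRange 0 (core.length : Int) 1).map
            (fun i => PySem.List.slice core (some i) none ++ PySem.List.slice core none (some i)) ++
          (PySem.List.pyRange 0 (core.reverse.length : Int) 1).map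
            (fun i => PySem.List.slice core.reverse (some i) none ++ PySem.List.slice core.reverse none (some i)))
         (fun x => x)).getD [])
    = (match (List.range core.length).foldl
          (fun C d => pvRound (core ++ core ++ core.reverse ++ core.reverse) d C)
          (List.range core.length ++ List.range' (2 * core.length) core.length) with
       | [] => ([] : List String)
       | i :: _ => PySem.List.slice (core ++ core ++ core.reverse ++ core.reverse)
            (some (i : Int)) (some ((i : Int) + (core.length : Int)))) := by
  rw [if_neg hcne, pvRotationsA_eq core, pvRotationsA_eq core.reverse]
  simp only [List.length_reverse]
  have hnpos : 0 < core.length := List.length_pos_iff.mpr hcne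
  set big := core ++ core ++ core.reverse ++ core.reverse with hbigdef
  have hbig : big = (core ++ core) ++ (core.reverse ++ core.reverse) := by
    rw [hbigdef]; simp [List.append_assoc]
  have hbiglen : big.length = 4 * core.length := by
    rw [hbig]; simp; omega
  have hcc : (core ++ core).length = 2 * core.length := by simp; omega
  set R := List.range core.length ++ List.range' (2 * core.length) core.length with hR
  have hmemR : ∀ i, i ∈ R ↔ i < core.length ∨
      (2 * core.length ≤ i ∧ i < 3 * core.length) := by
    intro i
    rw [hR, List.mem_append, List.mem_range, List.mem_range'_1]
    constructor
    · rintro (h | ⟨h1, h2⟩)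
      · exact Or.inl h
      · exact Or.inr ⟨h1, by omega⟩
    · rintro (h | ⟨h1, h2⟩)
      · exact Or.inl h
      · exact Or.inr ⟨h1, by omega⟩
  have hWF : ∀ i ∈ R, i + core.length ≤ big.length := by
    intro i hi
    rcases (hmemR i).mp hi with h | ⟨h1, h2⟩ <;> omega
  have h0R : 0 ∈ R := (hmemR 0).mpr (Or.inl hnpos)
  have hRne : R ≠ [] := List.ne_nil_of_mem h0R
  -- the value a candidate start position stands for
  have hval : ∀ i ∈ R, (pvPref big core.length i = pvRot core i ∧ i < core.length) ∨
      (pvPref big core.length i = pvRot core.reverse (i - 2 * core.length) ∧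
        2 * core.length ≤ i ∧ i - 2 * core.length < core.length) := by
    intro i hi
    rcases (hmemR i).mp hi with h | ⟨h1, h2⟩
    · refine Or.inl ⟨?_, h⟩
      rw [hbig]
      exact pvPref_rot_left core (core.reverse ++ core.reverse) i (le_of_lt h)
    · refine Or.inr ⟨?_, h1, by omega⟩
      rw [hbig]
      have hpr := pvPref_rot_right' (core ++ core) core.reverse (i - 2 * core.length)
        core.length (by simp) (by omega)
      rw [← hpr]
      congr 1
      rw [hcc]
      omega
  obtain ⟨hCne, hCsub, hCmin, -⟩ :=
    pvFold_inv big core.length R hWF hRne core.length (le_refl _)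
  cases hfin : (List.range core.length).foldl (fun C d => pvRound big d C) R with
  | nil => exact absurd hfin hCne
  | cons p rest =>
    rw [hfin] at hCsub hCmin
    have hpC : p ∈ p :: rest := List.mem_cons_self
    have hpR : p ∈ R := hCsub p hpC
    -- B's returned value is the length-n window at p
    have hBval : PySem.List.slice big (some (p : Int)) (some ((p : Int) + (core.length : Int)))
        = pvPref big core.length p := by
      rw [PySem.List.slice_natCast_add]
      rfl
    show (PySem.List.min?
        ((List.range core.length).map (pvRot core) ++ (List.range core.length).map (pvRot core.reverse))
        (fun x => x)).getD []
      = PySem.List.slice big (some (p : Int)) (some ((p : Int) + (core.length : Int)))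
    rw [hBval]
    -- p's value is one of A's rotations
    have hvmem : pvPref big core.length p ∈
        (List.range core.length).map (pvRot core) ++ (List.range core.length).map (pvRot core.reverse) := by
      rcases hval p hpR with ⟨hv, h⟩ | ⟨hv, h1, h2⟩
      · exact List.mem_append_left _ (List.mem_map.mpr ⟨p, List.mem_range.mpr h, hv.symm⟩)
      · exact List.mem_append_right _
          (List.mem_map.mpr ⟨p - 2 * core.length, List.mem_range.mpr h2, hv.symm⟩)
    -- and it is ≤ every rotation A lists
    have hdom : ∀ r ∈ (List.range core.length).map (pvRot core) ++
        (List.range core.length).map (pvRot core.reverse), pvPref big core.length p ≤ r := by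
      intro r hr
      rcases List.mem_append.mp hr with h | h <;> obtain ⟨i, hi, rfl⟩ := List.mem_map.mp h
      · have hiR : i ∈ R := (hmemR i).mpr (Or.inl (List.mem_range.mp hi))
        rcases hval i hiR with ⟨hv, -⟩ | ⟨-, h1, -⟩
        · exact hv ▸ hCmin p hpC i hiR
        · exact absurd (List.mem_range.mp hi) (by omega)
      · have hiR : (2 * core.length + i) ∈ R := by
          refine (hmemR _).mpr (Or.inr ⟨by omega, ?_⟩)
          have := List.mem_range.mp hi
          omega
        rcases hval _ hiR with ⟨-, h1⟩ | ⟨hv, -, -⟩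
        · exact absurd h1 (by omega)
        · have hv' : pvPref big core.length (2 * core.length + i) = pvRot core.reverse i := by
            rw [hv]; congr 1; omega
          exact hv' ▸ hCmin p hpC _ hiR
    -- hence A's min over all rotations is exactly that value
    have hsingle : ∀ c ∈ [pvPref big core.length p], c ∈
        (List.range core.length).map (pvRot core) ++ (List.range core.length).map (pvRot core.reverse) := by
      intro c hc
      rw [List.mem_singleton] at hc
      rw [hc]
      exact hvmem
    have hdomin := pvMin?_eq_of_dominating
      ((List.range core.length).map (pvRot core) ++ (List.range core.length).map (pvRot core.reverse))
      [pvPref big core.length p] (by simp) hsingle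
      (fun r hr => ⟨pvPref big core.length p, List.mem_singleton.mpr rfl, hdom r hr⟩)
    calc (PySem.List.min?
            ((List.range core.length).map (pvRot core) ++ (List.range core.length).map (pvRot core.reverse))
            (fun x => x)).getD []
        = (@PySem.List.min? _ _ _ LinearOrder.toDecidableLT
            ((List.range core.length).map (pvRot core) ++ (List.range core.length).map (pvRot core.reverse))
            (fun x => x)).getD [] := by rw [pvMin?_irrel]
      _ = (@PySem.List.min? _ _ _ LinearOrder.toDecidableLT [pvPref big core.length p] (fun x => x)).getD [] := by
            rw [hdomin]
      _ = pvPref big core.length p := by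
            rw [PySem.List.min?_id_cons]
            rfl

-- ===== VERDICT (by name: the statement is the Claim_ definition above) =====
theorem normalize_cycle_signature_py_spec : Claim_equal_normalize_cycle_signature_py := by
  intro cycle_nodes _
  unfold Spec_normalize_cycle_signature_py normalize_cycle_signature_py normalize_cycle_signature_py_alt
  by_cases hnil : cycle_nodes = []
  · rw [if_pos hnil, if_pos hnil]
  · rw [if_neg hnil, if_neg hnil, PySem.List.slice_none_none]
    have hcore : (if 1 < cycle_nodes.length ∧
          PySem.List.pyGet? cycle_nodes 0 = PySem.List.pyGet? cycle_nodes (-1)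
        then PySem.List.slice cycle_nodes none (some (-1)) else cycle_nodes) ≠ [] := by
      split_ifs with h
      · rw [PySem.List.slice_to_neg_one]
        refine List.ne_nil_of_length_pos ?_
        rw [List.length_dropLast]
        omega
      · exact hnil
    exact pvTail_eq _ hcore
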